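-- pv_equiv track=rewrite | github.com/ttcielott/generation-final-project | main_files/table_loading_product.py | get_unique_product_n_price
-- ===== SOURCE A (Python) =====
-- def get_unique_product_n_price(list_of_data_list):
--       """get the list of unique product infomation lists.
--
--     Args:
--         list_of_data_list: a list of list that contains transformed data
--
--     Returns:
--         a list of product infomrmation
--         e.g. [[['Chai latte', 'Large', '2.60'],
--                ['Chai latte', 'Regular', '2.30'],
--                ['Filter coffee', 'Large', '1.80']]
--     """
--       product_rows =[]
--       # loop over all product information in transformed data
--       for row in list_of_data_list:
--
--             # select product name, product size, product price
--             # save them in a list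
--             product_row = [row[-3], row[3], row[-2]]
--
--             # append product_row to product_rows
--             product_rows.append(product_row)
--
--       # remove duplicates
--       unique_product_row = set(map(tuple, product_rows)) # e.g. {('Filter coffee', 'Large', '1.80'), ('Filter coffee', 'Large', '1.80')}
--       unique_product_info = list(map(list, unique_product_row)) # e.g. [['Filter coffee', 'Large', '1.80'], ['Filter coffee', 'Large', '1.80']]
--
--       # sort the data
--       unique_product_info.sort()
--
--       return unique_product_info
-- ===== SOURCE B (Python) =====
-- def get_unique_product_n_price(list_of_data_list):
--     """Sort the projected rows once, then drop adjacent duplicates in one linear scan."""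
--     rows = sorted([row[-3], row[3], row[-2]] for row in list_of_data_list)
--     out = []
--     for row in rows:
--         if not out or out[-1] != row:
--             out.append(row)
--     return out
-- ===== Notes on version B (the rewrite author's own statement) =====
-- stated objective: alternative
-- what changed: Replaces hash-set deduplication followed by a sort with a single sort of all projected rows followed by a linear adjacent-duplicate scan.
import Mathlib
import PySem

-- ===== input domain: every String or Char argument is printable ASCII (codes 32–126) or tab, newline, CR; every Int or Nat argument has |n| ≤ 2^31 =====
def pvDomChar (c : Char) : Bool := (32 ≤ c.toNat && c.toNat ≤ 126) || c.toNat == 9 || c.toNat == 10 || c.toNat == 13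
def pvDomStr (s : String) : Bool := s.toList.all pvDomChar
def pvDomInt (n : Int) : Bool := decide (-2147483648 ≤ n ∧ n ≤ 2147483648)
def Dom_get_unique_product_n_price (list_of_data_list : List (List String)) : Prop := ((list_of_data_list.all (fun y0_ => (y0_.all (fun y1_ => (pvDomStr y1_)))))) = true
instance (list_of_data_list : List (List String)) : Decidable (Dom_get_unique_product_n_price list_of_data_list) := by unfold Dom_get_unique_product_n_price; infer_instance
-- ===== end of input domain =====

-- B replaces A's hash-set dedup followed by a sort with one sort of all projected rows
-- followed by a linear adjacent-duplicate scan (objective: alternative; return value proved equal).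

-- ===== PORT A =====
def get_unique_product_n_price (list_of_data_list : List (List String)) : List (List String) :=
  -- product_rows loop: append [row[-3], row[3], row[-2]] for each row (pyGetD is exact under Pre_)
  let product_rows := list_of_data_list.foldl (fun acc row =>
    acc ++ [[PySem.List.pyGetD row (-3) "", PySem.List.pyGetD row 3 "",
             PySem.List.pyGetD row (-2) ""]]) []
  -- set(map(tuple, product_rows)); tuples back to lists is the identity here
  let unique_product_info : PySem.Set (List String) := PySem.Set.ofList product_rows
  -- unique_product_info.sort()  (sorted of a set: order-independent, exact)
  PySem.List.sorted unique_product_info (fun x => x) false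

-- ===== PORT B =====
def pvProj (row : List String) : List String :=
  [PySem.List.pyGetD row (-3) "", PySem.List.pyGetD row 3 "", PySem.List.pyGetD row (-2) ""]

-- one step of B's scan: 'if not out or out[-1] != row: out.append(row)'
def pvStep (out : List (List String)) (row : List String) : List (List String) :=
  if out = [] ∨ PySem.List.pyGetD out (-1) [] ≠ row then out ++ [row] else out

def get_unique_product_n_price_alt (list_of_data_list : List (List String)) : List (List String) :=
  let rows := PySem.List.sorted (list_of_data_list.map pvProj) (fun x => x) false
  rows.foldl pvStep []

-- ===== PRECONDITION & SPEC =====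
-- Pre_: every row has at least 4 entries; on a shorter row Python A raises IndexError (row[3] / row[-3]).
def Pre_get_unique_product_n_price (list_of_data_list : List (List String)) : Prop :=
  ∀ row ∈ list_of_data_list, 4 ≤ row.length
instance (list_of_data_list : List (List String)) : Decidable (Pre_get_unique_product_n_price list_of_data_list) := by unfold Pre_get_unique_product_n_price; infer_instance

def pvWitness_get_unique_product_n_price : List (List String) :=
  [["1", "Chai latte", "x", "Large", "2.60", "y"], ["1", "Chai latte", "x", "Large", "2.60", "y"]]

def Spec_get_unique_product_n_price (list_of_data_list : List (List String)) (out : List (List String)) : Prop := out = get_unique_product_n_price_alt list_of_data_list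
instance (list_of_data_list : List (List String)) (out : List (List String)) : Decidable (Spec_get_unique_product_n_price list_of_data_list out) := by unfold Spec_get_unique_product_n_price; infer_instance

-- ===== CLAIM (what is proved, stated in full; the proofs are below) =====
def Claim_equal_get_unique_product_n_price : Prop := ∀ (list_of_data_list : List (List String)), Dom_get_unique_product_n_price list_of_data_list → Pre_get_unique_product_n_price list_of_data_list → Spec_get_unique_product_n_price list_of_data_list (get_unique_product_n_price list_of_data_list)

-- ===== LEMMAS AND PROOFS =====

-- in a strictly increasing list the last element bounds every member
lemma pv_le_getLast {α : Type} [LinearOrder α] :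
    ∀ (l : List α) (h : l ≠ []), l.Pairwise (· < ·) → ∀ a ∈ l, a ≤ l.getLast h := by
  intro l
  induction l with
  | nil => intro h; exact absurd rfl h
  | cons x t ih =>
    intro _ hp a ha
    cases t with
    | nil => simp at ha; simp [ha]
    | cons y s =>
      rw [List.getLast_cons (by simp)]
      rcases List.mem_cons.mp ha with rfl | ha'
      · exact le_of_lt ((List.pairwise_cons.mp hp).1 _ (List.getLast_mem _))
      · exact ih (by simp) (List.pairwise_cons.mp hp).2 a ha'

lemma pv_mem_step (out : List (List String)) (row x : List String) :
    x ∈ pvStep out row ↔ x ∈ out ∨ x = row := by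
  unfold pvStep
  split_ifs with h
  · simp
  · rw [not_or, not_not] at h
    obtain ⟨hne, heq⟩ := h
    constructor
    · exact fun hx => Or.inl hx
    · rintro (hx | rfl)
      · exact hx
      · rw [← heq, PySem.List.pyGetD_neg_one out [] hne]; exact List.getLast_mem hne

-- B's scan preserves membership (a dropped row equals the last kept one)
lemma pv_mem_foldl (zs : List (List String)) :
    ∀ (acc : List (List String)) (x : List String),
      x ∈ zs.foldl pvStep acc ↔ x ∈ acc ∨ x ∈ zs := by
  induction zs with
  | nil => simp
  | cons z t ih =>
    intro acc x
    rw [List.foldl_cons, ih, pv_mem_step]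
    simp; tauto

-- on a ≤-sorted remainder B's scan keeps the accumulator strictly increasing
lemma pv_pairwise_foldl (zs : List (List String)) :
    ∀ (acc : List (List String)), acc.Pairwise (· < ·) → zs.Pairwise (· ≤ ·) →
      (∀ a ∈ acc, ∀ z ∈ zs, a ≤ z) → (zs.foldl pvStep acc).Pairwise (· < ·) := by
  induction zs with
  | nil => intro acc h _ _; simpa using h
  | cons b t ih =>
    intro acc hacc hzs hle
    rw [List.foldl_cons]
    rcases List.pairwise_cons.mp hzs with ⟨hb_le, ht⟩
    have hstep : (pvStep acc b).Pairwise (· < ·) ∧ ∀ a ∈ pvStep acc b, ∀ z' ∈ t, a ≤ z' := by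
      unfold pvStep
      split_ifs with h
      · refine ⟨List.pairwise_append.mpr ⟨hacc, by simp, ?_⟩, ?_⟩
        · intro a ha c hc
          simp only [List.mem_singleton] at hc
          rw [hc]
          rcases h with hnil | hne
          · exact absurd ha (by simp [hnil])
          · have hne2 : acc ≠ [] := by rintro rfl; simp at ha
            have hlast : a ≤ PySem.List.pyGetD acc (-1) [] := by
              rw [PySem.List.pyGetD_neg_one acc [] hne2]
              exact pv_le_getLast acc hne2 hacc a ha
            have hmem : PySem.List.pyGetD acc (-1) [] ∈ acc := by
              rw [PySem.List.pyGetD_neg_one acc [] hne2]; exact List.getLast_mem hne2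
            exact lt_of_le_of_lt hlast (lt_of_le_of_ne (hle _ hmem b (by simp)) hne)
        · intro a ha z' hz'
          rcases List.mem_append.mp ha with ha' | ha'
          · exact hle a ha' z' (by simp [hz'])
          · simp only [List.mem_singleton] at ha'; rw [ha']; exact hb_le z' hz'
      · exact ⟨hacc, fun a ha z' hz' => hle a ha z' (by simp [hz'])⟩
    exact ih _ hstep.1 ht hstep.2

-- the two DecidableLT instances on List String decide the same (defeq) order
lemma pv_sorted_inst (xs : List (List String)) :
    (@PySem.List.sorted (List String) (List String) List.instLT (fun a b => a.decidableLT b) xs (fun x => x) false)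
    = @PySem.List.sorted (List String) (List String) List.instLinearOrder.toLT LinearOrder.toDecidableLT xs (fun x => x) false := by
  congr 1

-- the core fact: sorted(set(P)) = adjacent-dedup of sorted(P)
lemma pv_main (P : List (List String)) :
    PySem.List.sorted (PySem.Set.ofList P) (fun x => x) false
      = (PySem.List.sorted P (fun x => x) false).foldl pvStep [] := by
  rw [pv_sorted_inst, pv_sorted_inst]
  have hLlt := PySem.List.sorted_ofList_pairwise_lt P
  have hSle := PySem.List.sorted_pairwise P (fun x => x)
  generalize hL : @PySem.List.sorted (List String) (List String) List.instLinearOrder.toLT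
      LinearOrder.toDecidableLT (PySem.Set.ofList P) (fun x => x) false = L at hLlt ⊢
  generalize hS : @PySem.List.sorted (List String) (List String) List.instLinearOrder.toLT
      LinearOrder.toDecidableLT P (fun x => x) false = S at hSle ⊢
  have hRlt : (S.foldl pvStep []).Pairwise (· < ·) :=
    pv_pairwise_foldl S [] (by simp) hSle (by simp)
  have hmem : ∀ x, x ∈ L ↔ x ∈ S.foldl pvStep [] := by
    intro x
    rw [← hL, ← hS, pv_mem_foldl,
        @PySem.List.mem_sorted (List String) (List String) _ LinearOrder.toDecidableLT,
        @PySem.List.mem_sorted (List String) (List String) _ LinearOrder.toDecidableLT,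
        PySem.Set.mem_ofList]
    simp
  have hperm := (List.perm_ext_iff_of_nodup (hLlt.imp ne_of_lt) (hRlt.imp ne_of_lt)).mpr hmem
  exact List.Perm.eq_of_pairwise (fun a b _ _ h1 h2 => le_antisymm h1 h2)
    (hLlt.imp le_of_lt) (hRlt.imp le_of_lt) hperm

-- ===== VERDICT (by name: the statement is the Claim_ definition above) =====
theorem get_unique_product_n_price_spec : Claim_equal_get_unique_product_n_price := by
  intro l _ _
  unfold Spec_get_unique_product_n_price get_unique_product_n_price get_unique_product_n_price_alt
  rw [PySem.List.foldl_append_singleton_eq_map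
        (f := fun row => [PySem.List.pyGetD row (-3) "", PySem.List.pyGetD row 3 "",
                          PySem.List.pyGetD row (-2) ""]),
      List.nil_append]
  exact pv_main (l.map pvProj)
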